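-- pv_equiv track=rewrite | github.com/Salianbooth/Compilers | lexer/manual_lexer.py | is_valid_hex
-- ===== SOURCE A (Python) =====
-- def is_valid_hex(num: str) -> bool:
--     """
--     判断字符串 num 是否为合法的十六进制整数字面量。
--     要求以 '0x' 或 '0X' 开头，且后面至少有一位十六进制数字。
--     """
--     # 首先以小写判断前缀，并且长度至少大于 2
--     if not num.lower().startswith('0x') or len(num) <= 2:
--         return False
--
--     # 定义合法的十六进制数字集合（包括大小写）
--     hex_digits = '0123456789abcdefABCDEF'
--     # 从 num[2:] 开始，每个字符必须都在合法集合中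
--     for c in num[2:]:
--         if c not in hex_digits:
--             return False
--     return True
-- ===== SOURCE B (Python) =====
-- def is_valid_hex(num: str) -> bool:
--     # Single left-to-right pass of a 5-state DFA; no slicing, no lower(), no digit table.
--     # states: 0 expect '0'; 1 expect 'x'/'X'; 2 expect first hex digit; 3 inside digits; 4 dead
--     state = 0
--     for c in num:
--         if state == 0:
--             state = 1 if c == '0' else 4
--         elif state == 1:
--             state = 2 if c == 'x' or c == 'X' else 4
--         elif state == 2 or state == 3:
--             state = 3 if ('0' <= c <= '9' or 'a' <= c <= 'f' or 'A' <= c <= 'F') else 4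
--     return state == 3
-- ===== Notes on version B (the rewrite author's own statement) =====
-- stated objective: alternative
-- what changed: A does staged checks (lowercase the string, a prefix startswith test, a length test, then scan the tail slice against a digit table); B makes one pass over the whole string with an explicit 5-state DFA accumulator and classifies hex digits by character-range comparisons, with no slicing, no lower() and no digit table.
import Mathlib
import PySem

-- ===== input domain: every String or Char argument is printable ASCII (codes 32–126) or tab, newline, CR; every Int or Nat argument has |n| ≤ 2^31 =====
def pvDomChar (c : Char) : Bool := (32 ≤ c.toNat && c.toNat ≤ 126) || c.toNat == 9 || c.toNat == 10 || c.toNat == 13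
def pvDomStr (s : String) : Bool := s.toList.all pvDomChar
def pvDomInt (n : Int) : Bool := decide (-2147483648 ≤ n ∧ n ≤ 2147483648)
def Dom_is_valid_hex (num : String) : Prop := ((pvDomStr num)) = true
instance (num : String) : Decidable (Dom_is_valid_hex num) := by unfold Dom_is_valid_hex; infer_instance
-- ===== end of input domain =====

-- B replaces A's staged checks (lower + startswith + length + scan of num[2:] against a
-- digit table) by a single left-to-right pass of a 5-state DFA with range comparisons
-- (objective: alternative; same cost).

-- ===== PORT A =====
-- the literal '0123456789abcdefABCDEF'
def pvHexDigits : List Char := "0123456789abcdefABCDEF".toList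

-- the for-loop over num[2:]: 'if c not in hex_digits: return False' / 'return True'
-- ('c in hex_digits' for the single character c is substring membership, PySem.Chars.isIn [c])
def pvLoopA : List Char → Bool
  | [] => true
  | c :: rest => if !(PySem.Chars.isIn [c] pvHexDigits) then false else pvLoopA rest

def is_valid_hex (num : String) : Bool :=
  if !(PySem.Str.startswith (PySem.Str.lower num) "0x") || decide (PySem.Str.len num ≤ 2) then false
  else pvLoopA (PySem.List.slice num.toList (some 2) none)

-- ===== PORT B =====
-- '0' <= c <= '9' or 'a' <= c <= 'f' or 'A' <= c <= 'F'
def pvIsHexB (c : Char) : Bool :=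
  decide (('0' ≤ c ∧ c ≤ '9') ∨ ('a' ≤ c ∧ c ≤ 'f') ∨ ('A' ≤ c ∧ c ≤ 'F'))

-- the DFA transition of B's loop body
def pvStepB (s : Nat) (c : Char) : Nat :=
  if s = 0 then (if c = '0' then 1 else 4)
  else if s = 1 then (if c = 'x' || c = 'X' then 2 else 4)
  else if s = 2 || s = 3 then (if pvIsHexB c then 3 else 4)
  else s

def is_valid_hex_alt (num : String) : Bool :=
  (num.toList.foldl pvStepB 0) == 3

-- ===== PRECONDITION & SPEC =====
def Spec_is_valid_hex (num : String) (out : Bool) : Prop := out = is_valid_hex_alt num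
instance (num : String) (out : Bool) : Decidable (Spec_is_valid_hex num out) := by unfold Spec_is_valid_hex; infer_instance

-- ===== CLAIM (what is proved, stated in full; the proofs are below) =====
def Claim_equal_is_valid_hex : Prop := ∀ (num : String), Dom_is_valid_hex num → Spec_is_valid_hex num (is_valid_hex num)

-- ===== LEMMAS AND PROOFS =====

lemma char_eq_iff_toNat (a b : Char) : a = b ↔ a.toNat = b.toNat := by
  constructor
  · rintro rfl; rfl
  · intro h; exact Char.ext (UInt32.toNat_inj.mp h)

lemma char_le_iff_toNat (a b : Char) : a ≤ b ↔ a.toNat ≤ b.toNat := by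
  rw [Char.le_def, UInt32.le_iff_toNat_le]; rfl

lemma isupper_iff (a : Char) : PySem.Chars.isupper a = true ↔ 65 ≤ a.toNat ∧ a.toNat ≤ 90 := by
  rw [PySem.Chars.isupper]
  simp only [Bool.and_eq_true, decide_eq_true_eq, Char.le_def, UInt32.le_iff_toNat_le]
  rfl

lemma lowerChar_toNat (a : Char) :
    (PySem.Chars.lowerChar a).toNat = if 65 ≤ a.toNat ∧ a.toNat ≤ 90 then a.toNat + 32 else a.toNat := by
  unfold PySem.Chars.lowerChar
  by_cases h : PySem.Chars.isupper a = true
  · rw [if_pos h]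
    have h' := (isupper_iff a).mp h
    rw [if_pos h', Char.toNat_ofNat, if_pos]
    exact Or.inl (by omega)
  · rw [if_neg h, if_neg]
    rw [isupper_iff] at h; exact h

lemma lowerChar_eq_zero (a : Char) : PySem.Chars.lowerChar a = '0' ↔ a = '0' := by
  rw [char_eq_iff_toNat, char_eq_iff_toNat, lowerChar_toNat]
  have : ('0' : Char).toNat = 48 := by decide
  rw [this]
  split_ifs with h
  · omega
  · omega

lemma lowerChar_eq_x (a : Char) : PySem.Chars.lowerChar a = 'x' ↔ a = 'x' ∨ a = 'X' := by
  rw [char_eq_iff_toNat, char_eq_iff_toNat, char_eq_iff_toNat, lowerChar_toNat]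
  have h1 : ('x' : Char).toNat = 120 := by decide
  have h2 : ('X' : Char).toNat = 88 := by decide
  rw [h1, h2]
  split_ifs with h
  · omega
  · omega

lemma isIn_singleton (c : Char) (s : List Char) : PySem.Chars.isIn [c] s = true ↔ c ∈ s := by
  rw [PySem.Chars.isIn_iff_infix]
  exact List.singleton_infix_iff c s

-- membership in A's digit table coincides with B's range test
lemma mem_hex_iff (c : Char) : c ∈ pvHexDigits ↔ pvIsHexB c = true := by
  have h : pvHexDigits =
      ['0','1','2','3','4','5','6','7','8','9','a','b','c','d','e','f',
       'A','B','C','D','E','F'] := rfl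
  rw [h]
  unfold pvIsHexB
  simp only [List.mem_cons, List.not_mem_nil, or_false, decide_eq_true_eq,
    char_eq_iff_toNat, char_le_iff_toNat]
  constructor
  · rintro (h|h|h|h|h|h|h|h|h|h|h|h|h|h|h|h|h|h|h|h|h|h) <;>
      simp_all
  · intro h
    revert h
    simp only [show ('0':Char).toNat = 48 from rfl, show ('9':Char).toNat = 57 from rfl,
      show ('a':Char).toNat = 97 from rfl, show ('f':Char).toNat = 102 from rfl,
      show ('A':Char).toNat = 65 from rfl, show ('F':Char).toNat = 70 from rfl,
      show ('1':Char).toNat = 49 from rfl, show ('2':Char).toNat = 50 from rfl,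
      show ('3':Char).toNat = 51 from rfl, show ('4':Char).toNat = 52 from rfl,
      show ('5':Char).toNat = 53 from rfl, show ('6':Char).toNat = 54 from rfl,
      show ('7':Char).toNat = 55 from rfl, show ('8':Char).toNat = 56 from rfl,
      show ('b':Char).toNat = 98 from rfl, show ('c':Char).toNat = 99 from rfl,
      show ('d':Char).toNat = 100 from rfl, show ('e':Char).toNat = 101 from rfl,
      show ('B':Char).toNat = 66 from rfl, show ('C':Char).toNat = 67 from rfl,
      show ('D':Char).toNat = 68 from rfl, show ('E':Char).toNat = 69 from rfl]
    omega

lemma loopA_iff (xs : List Char) : pvLoopA xs = true ↔ ∀ c ∈ xs, pvIsHexB c = true := by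
  induction xs with
  | nil => simp [pvLoopA]
  | cons c rest ih =>
    by_cases h : c ∈ pvHexDigits
    · simp [pvLoopA, (isIn_singleton c pvHexDigits).mpr h, ih, (mem_hex_iff c).mp h]
    · have hne : pvIsHexB c ≠ true := fun hc => h ((mem_hex_iff c).mpr hc)
      have : PySem.Chars.isIn [c] pvHexDigits = false := by
        cases hin : PySem.Chars.isIn [c] pvHexDigits
        · rfl
        · exact absurd ((isIn_singleton c pvHexDigits).mp hin) h
      simp [pvLoopA, this, hne]

-- state 4 is dead
lemma foldl_step_four (l : List Char) : l.foldl pvStepB 4 = 4 := by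
  induction l with
  | nil => rfl
  | cons c rest ih => simpa [pvStepB] using ih

-- state 3 accepts iff all remaining characters are hex digits
lemma foldl_step_three (l : List Char) :
    (l.foldl pvStepB 3 = 3) ↔ (∀ c ∈ l, pvIsHexB c = true) := by
  induction l with
  | nil => simp
  | cons c rest ih =>
    by_cases h : pvIsHexB c = true
    · simp [pvStepB, h, ih]
    · simp [pvStepB, h, foldl_step_four]

-- state 2 accepts iff there is at least one character and all are hex digits
lemma foldl_step_two (l : List Char) :
    (l.foldl pvStepB 2 = 3) ↔ (l ≠ [] ∧ ∀ c ∈ l, pvIsHexB c = true) := by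
  cases l with
  | nil => simp
  | cons c rest =>
    by_cases h : pvIsHexB c = true
    · simp [pvStepB, h, foldl_step_three]
    · simp [pvStepB, h, foldl_step_four]

lemma if_false_else (c x : Bool) : (if c = true then false else x) = (!c && x) := by
  cases c <;> simp

-- characterization of B's DFA on a string of length ≥ 2
lemma alt_iff (a b : Char) (t : List Char) :
    ((a :: b :: t).foldl pvStepB 0 = 3) ↔
      (a = '0' ∧ (b = 'x' ∨ b = 'X') ∧ t ≠ [] ∧ ∀ c ∈ t, pvIsHexB c = true) := by
  simp only [List.foldl_cons]
  by_cases ha : a = '0'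
  · subst ha
    have h1 : pvStepB 0 '0' = 1 := rfl
    rw [h1]
    by_cases hbx : b = 'x' ∨ b = 'X'
    · have h2' : pvStepB 1 b = 2 := by
        rcases hbx with rfl | rfl <;> rfl
      rw [h2', foldl_step_two]
      simp [hbx]
    · have h4 : pvStepB 1 b = 4 := by
        have hx : ¬ b = 'x' := fun h => hbx (Or.inl h)
        have hX : ¬ b = 'X' := fun h => hbx (Or.inr h)
        simp [pvStepB, hx, hX]
      rw [h4, foldl_step_four]
      simp [hbx]
  · have h4 : pvStepB 0 a = 4 := by simp [pvStepB, ha]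
    rw [h4]
    have h4' : pvStepB 4 b = 4 := rfl
    rw [h4', foldl_step_four]
    simp [ha]

theorem is_valid_hex_eq_alt (num : String) : is_valid_hex num = is_valid_hex_alt num := by
  unfold is_valid_hex is_valid_hex_alt
  rw [PySem.Str.startswith_eq, PySem.Str.toList_lower, PySem.Str.len_eq]
  have h2 : ((2 : Int) = ((2 : Nat) : Int)) := rfl
  rw [h2, PySem.List.slice_from_natCast, if_false_else]
  have h0x : "0x".toList = ['0', 'x'] := rfl
  rw [h0x]
  rcases num.toList with _ | ⟨a, _ | ⟨b, t⟩⟩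
  · simp
  · simp only [PySem.Chars.startswith, PySem.Chars.lower, List.map_cons, List.map_nil,
      List.isPrefixOf, List.foldl_cons, List.foldl_nil]
    by_cases ha : a = '0'
    · simp [ha, pvStepB]
    · simp [pvStepB, ha]
  · rw [Bool.eq_iff_iff, beq_iff_eq, alt_iff]
    simp only [PySem.Chars.startswith, PySem.Chars.lower, List.map_cons, List.isPrefixOf,
      List.length_cons, List.drop_succ_cons, List.drop_zero,
      Bool.not_or, Bool.not_not, Bool.and_eq_true, Bool.not_eq_true',
      decide_eq_false_iff_not, beq_iff_eq, loopA_iff]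
    constructor
    · rintro ⟨⟨⟨ha, hb⟩, hlen⟩, hrest⟩
      rw [eq_comm, lowerChar_eq_zero] at ha
      rw [eq_comm, lowerChar_eq_x] at hb
      have ht : t ≠ [] := by
        intro h; subst h; simp at hlen
      exact ⟨ha, hb.1, ht, hrest⟩
    · rintro ⟨ha, hb, ht, hrest⟩
      refine ⟨⟨⟨?_, ?_⟩, ?_⟩, hrest⟩
      · rw [eq_comm, lowerChar_eq_zero]; exact ha
      · rw [eq_comm, lowerChar_eq_x]; exact ⟨hb, trivial⟩
      · have : 0 < t.length := List.length_pos_iff.mpr ht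
        push_cast; omega

-- ===== VERDICT (by name: the statement is the Claim_ definition above) =====
theorem is_valid_hex_spec : Claim_equal_is_valid_hex := by
  intro num _
  unfold Spec_is_valid_hex
  exact is_valid_hex_eq_alt num
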